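-- pv_equiv track=rewrite | github.com/Bullish-Intelligence/remora | .context/fsdantic/src/fsdantic/kv.py | _compose_prefix
-- ===== SOURCE A (Python) =====
-- def _compose_prefix(base: str, child: str) -> str:
--     """Compose and normalize namespace prefixes.
--
--     Canonical prefix rules:
--     - Empty segments are ignored.
--     - Prefix segments are separated by a single ":".
--     - Non-empty composed prefixes always end with ":".
--
--     Examples:
--         "app" + "user" -> "app:user:"
--         "app:" + "user:" -> "app:user:"
--         "" + "" -> ""
--     """
--
--     segments: list[str] = []
--     for part in (base, child):
--         if not part:
--             continue
--         normalized = part.strip(":")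
--         if normalized:
--             segments.extend(segment for segment in normalized.split(":") if segment)
--
--     return ":".join(segments) + (":" if segments else "")
-- ===== SOURCE B (Python) =====
-- def _compose_prefix(base: str, child: str) -> str:
--     # Single character-level scan (state machine): emit non-colon chars,
--     # collapsing colon runs into one separator, dropping leading/trailing ones.
--     out = []
--     sep = False
--     for c in base + ":" + child:
--         if c == ":":
--             sep = True
--         else:
--             if sep and out:
--                 out.append(":")
--             out.append(c)
--             sep = False
--     return "".join(out) + (":" if out else "")
-- ===== Notes on version B (the rewrite author's own statement) =====
-- stated objective: alternative
-- what changed: B replaces A's token-level pipeline (per-argument strip(':'), split(':'), filter, join) by a single character-level state machine over base+':'+child that emits chars directly, collapsing colon runs into one separator and dropping leading/trailing ones; no split/strip/join of tokens is ever built.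
import Mathlib
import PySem

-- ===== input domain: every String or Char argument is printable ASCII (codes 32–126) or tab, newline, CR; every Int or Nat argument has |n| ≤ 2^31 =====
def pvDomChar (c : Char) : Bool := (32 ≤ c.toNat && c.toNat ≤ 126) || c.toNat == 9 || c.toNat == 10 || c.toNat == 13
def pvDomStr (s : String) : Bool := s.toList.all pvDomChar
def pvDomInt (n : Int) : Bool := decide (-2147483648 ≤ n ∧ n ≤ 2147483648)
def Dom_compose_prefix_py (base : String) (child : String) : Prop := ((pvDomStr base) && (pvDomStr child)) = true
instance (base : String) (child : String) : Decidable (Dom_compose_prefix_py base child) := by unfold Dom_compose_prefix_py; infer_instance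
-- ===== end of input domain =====

-- B replaces A's token pipeline (strip/split/filter/join) by one character-level
-- state machine over base+":"+child that emits chars directly (objective: alternative).


-- ===== PORT A =====
-- literal port of _compose_prefix: loop over (base, child), skip falsy parts,
-- strip ":" ends, split on ":", keep non-empty segments; join and add trailing ":".
def compose_prefix_py (base : String) (child : String) : String :=
  let segments : List (List Char) :=
    [base.toList, child.toList].foldl (fun segs part =>
      if part = [] then segs                                     -- "if not part: continue"
      else
        let normalized := PySem.Chars.stripChars part [':']      -- part.strip(":")
        if normalized = [] then segs                             -- "if normalized:"
        else segs ++ (PySem.Chars.splitOn normalized [':']).filter (fun s => !s.isEmpty)) []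
  String.ofList (PySem.Chars.join [':'] segments ++ (if segments = [] then [] else [':']))

-- ===== PORT B =====
-- port of Source B: one fold over the chars of base+":"+child with state (out, sep).
def bStep (st : List Char × Bool) (c : Char) : List Char × Bool :=
  if c = ':' then (st.1, true)
  else (st.1 ++ (if st.2 = true ∧ st.1 ≠ [] then [':'] else []) ++ [c], false)

def compose_prefix_py_alt (base : String) (child : String) : String :=
  let st := (base.toList ++ [':'] ++ child.toList).foldl bStep ([], false)
  String.ofList (st.1 ++ (if st.1 = [] then [] else [':']))

-- ===== PRECONDITION & SPEC =====
def Spec_compose_prefix_py (base : String) (child : String) (out : String) : Prop := out = compose_prefix_py_alt base child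
instance (base : String) (child : String) (out : String) : Decidable (Spec_compose_prefix_py base child out) := by unfold Spec_compose_prefix_py; infer_instance

-- ===== CLAIM (what is proved, stated in full; the proofs are below) =====
def Claim_equal_compose_prefix_py : Prop := ∀ (base : String) (child : String), Dom_compose_prefix_py base child → Spec_compose_prefix_py base child (compose_prefix_py base child)

-- ===== LEMMAS AND PROOFS =====

-- structural reformulation of PySem.Chars.splitOn on the one-char separator ":"
def mySplit : List Char → List (List Char)
  | [] => [[]]
  | c :: t => if c = ':' then [] :: mySplit t
              else match mySplit t with
                   | [] => [[c]]
                   | h :: tt => (c :: h) :: tt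

theorem mySplit_ne_nil (l : List Char) : mySplit l ≠ [] := by
  cases l with
  | nil => simp [mySplit]
  | cons c t =>
    simp only [mySplit]
    split_ifs
    · simp
    · cases h : mySplit t <;> simp

theorem go_spec : ∀ (f : Nat) (l cur : List Char) (acc : List (List Char)),
    l.length ≤ f →
    PySem.Chars.splitOn.go [':'] f l cur acc =
      acc.reverse ++ (match mySplit l with
        | [] => [cur.reverse]
        | h :: tt => (cur.reverse ++ h) :: tt) := by
  intro f
  induction f with
  | zero =>
    intro l cur acc h
    have : l = [] := List.length_eq_zero_iff.mp (Nat.le_zero.mp h)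
    subst this
    simp [PySem.Chars.splitOn.go, mySplit]
  | succ f ih =>
    intro l cur acc h
    cases l with
    | nil => simp [PySem.Chars.splitOn.go, mySplit]
    | cons c t =>
      by_cases hc : c = ':'
      · subst hc
        have hpre : [':'].isPrefixOf (':' :: t) = true := by simp [List.isPrefixOf]
        rw [PySem.Chars.splitOn.go]
        simp only [hpre, if_true, List.length_singleton, List.drop_succ_cons, List.drop_zero]
        have ht : t.length ≤ f := by simpa using h
        rw [ih t [] (cur.reverse :: acc) ht]
        cases hm : mySplit t with
        | nil => exact absurd hm (mySplit_ne_nil t)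
        | cons h' tt => simp [mySplit, hm]
      · have hpre : [':'].isPrefixOf (c :: t) = false := by
          simp [List.isPrefixOf]; exact fun h' => hc h'.symm
        rw [PySem.Chars.splitOn.go]
        simp only [hpre, Bool.false_eq_true, if_false]
        have ht : t.length ≤ f := by simpa using h
        rw [ih t (c :: cur) acc ht]
        cases hm : mySplit t with
        | nil => exact absurd hm (mySplit_ne_nil t)
        | cons h' tt => simp [mySplit, hm, hc]

theorem splitOn_eq (s : List Char) : PySem.Chars.splitOn s [':'] = mySplit s := by
  unfold PySem.Chars.splitOn
  rw [go_spec (s.length + 1) s [] [] (by omega)]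
  cases hm : mySplit s with
  | nil => exact absurd hm (mySplit_ne_nil s)
  | cons h tt => simp

-- the non-empty segments of a colon-split
def seg (s : List Char) : List (List Char) := (mySplit s).filter (fun x => !x.isEmpty)

theorem seg_nil : seg [] = [] := by simp [seg, mySplit]

theorem mySplit_append_colon (a b : List Char) :
    mySplit (a ++ ':' :: b) = mySplit a ++ mySplit b := by
  induction a with
  | nil => simp [mySplit]
  | cons c a ih =>
    by_cases hc : c = ':'
    · subst hc; simp [mySplit, ih]
    · simp only [List.cons_append, mySplit, hc, if_false, ih]
      cases hm : mySplit a with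
      | nil => exact absurd hm (mySplit_ne_nil a)
      | cons h tt => simp

theorem seg_append_colon (a b : List Char) : seg (a ++ ':' :: b) = seg a ++ seg b := by
  simp [seg, mySplit_append_colon, List.filter_append]

theorem seg_colons_left (l : List Char) (x : List Char) (h : ∀ c ∈ l, c = ':') :
    seg (l ++ x) = seg x := by
  induction l with
  | nil => simp
  | cons c t ih =>
    have hc : c = ':' := h c (by simp)
    subst hc
    have : (':' :: t) ++ x = [] ++ ':' :: (t ++ x) := by simp
    rw [this, seg_append_colon, seg_nil, List.nil_append,
      ih (fun c hc => h c (by simp [hc]))]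

theorem seg_colons_right (l : List Char) (x : List Char) (h : ∀ c ∈ l, c = ':') :
    seg (x ++ l) = seg x := by
  induction l generalizing x with
  | nil => simp
  | cons c t ih =>
    have hc : c = ':' := h c (by simp)
    subst hc
    have : x ++ ':' :: t = x ++ ':' :: (t ++ []) := by simp
    rw [this, seg_append_colon]
    rw [seg_colons_left t [] (fun c hc => h c (by simp [hc]))]
    simp [seg_nil]

theorem seg_stripChars (s : List Char) : seg (PySem.Chars.stripChars s [':']) = seg s := by
  unfold PySem.Chars.stripChars
  set p : Char → Bool := fun c => [':'].contains c with hp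
  have hpc : ∀ c, p c = true → c = ':' := by
    intro c h; simpa [hp] using h
  have h1 : seg (List.dropWhile p s) = seg s := by
    conv_rhs => rw [← List.takeWhile_append_dropWhile (p := p) (l := s)]
    exact (seg_colons_left _ _ (fun c hc => hpc c (List.mem_takeWhile_imp hc))).symm
  set y := List.dropWhile p s with hy
  have h2 : y = (List.dropWhile p y.reverse).reverse ++ (List.takeWhile p y.reverse).reverse := by
    conv_lhs => rw [← List.reverse_reverse y]
    rw [← List.reverse_append, List.takeWhile_append_dropWhile]
  calc seg (List.dropWhile p y.reverse).reverse
      = seg ((List.dropWhile p y.reverse).reverse ++ (List.takeWhile p y.reverse).reverse) := by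
        refine (seg_colons_right _ _ ?_).symm
        intro c hc
        exact hpc c (List.mem_takeWhile_imp (by simpa using hc))
    _ = seg y := by rw [← h2]
    _ = seg s := h1

-- A's contribution of one argument equals its plain non-empty colon-split
theorem segA_eq (p : List Char) :
    (if p = [] then ([] : List (List Char))
     else if PySem.Chars.stripChars p [':'] = [] then []
     else (PySem.Chars.splitOn (PySem.Chars.stripChars p [':']) [':']).filter (fun s => !s.isEmpty))
    = seg p := by
  by_cases h0 : p = []
  · subst h0; simp [seg_nil]
  · simp only [h0, if_false]
    by_cases h1 : PySem.Chars.stripChars p [':'] = []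
    · rw [if_pos h1, ← seg_stripChars p, h1, seg_nil]
    · rw [if_neg h1, splitOn_eq]
      exact seg_stripChars p

theorem stepA_eq (x : List (List Char)) (p : List Char) :
    (if p = [] then x
     else
       let normalized := PySem.Chars.stripChars p [':']
       if normalized = [] then x
       else x ++ (PySem.Chars.splitOn normalized [':']).filter (fun s => !s.isEmpty))
    = x ++ seg p := by
  rw [← segA_eq p]
  by_cases h0 : p = [] <;> by_cases h1 : PySem.Chars.stripChars p [':'] = [] <;>
    simp [h0, h1]

-- ===== B-side: the state-machine invariant =====

-- whether the first segment of mySplit is empty, in terms of the input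
theorem mySplit_head_empty (t : List Char) (h : List Char) (tt : List (List Char))
    (hm : mySplit t = h :: tt) : (h = []) ↔ (t = [] ∨ t.head? = some ':') := by
  cases t with
  | nil =>
    simp only [mySplit] at hm
    have h1 : ([] : List Char) = h := (List.cons.injEq _ _ _ _ ▸ hm).1
    simp [← h1]
  | cons d t' =>
    by_cases hd : d = ':'
    · subst hd
      simp only [mySplit] at hm
      have h1 : ([] : List Char) = h := (List.cons.injEq _ _ _ _ ▸ hm).1
      simp [← h1]
    · simp only [mySplit, if_neg hd] at hm
      cases hm' : mySplit t' with
      | nil => exact absurd hm' (mySplit_ne_nil t')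
      | cons h' tt' =>
        rw [hm'] at hm
        have hm2 : (d :: h') :: tt' = h :: tt := hm
        have h1 : d :: h' = h := (List.cons.injEq _ _ _ _ ▸ hm2).1
        simp [← h1, hd]

theorem join_cons_ne_nil (x : List Char) (r : List (List Char)) (hx : x ≠ []) :
    PySem.Chars.join [':'] (x :: r) ≠ [] := by
  cases r with
  | nil => simpa [PySem.Chars.join_singleton] using hx
  | cons y r' => simp [PySem.Chars.join_cons_cons, hx]

theorem join_cons_cons_char (c : Char) (h : List Char) (r : List (List Char)) :
    PySem.Chars.join [':'] ((c :: h) :: r) = c :: PySem.Chars.join [':'] (h :: r) := by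
  cases r with
  | nil => simp [PySem.Chars.join_singleton]
  | cons y r' => simp [PySem.Chars.join_cons_cons]

-- the invariant of Source B's scan: the output is `out` plus the joined non-empty
-- segments of the rest, with a separating colon exactly when out is non-empty
-- and a colon was pending (sep) or comes first in l
theorem scan_inv (l : List Char) : ∀ (out : List Char) (sep : Bool),
    (l.foldl bStep (out, sep)).1 =
      out ++ (if seg l = [] then []
              else (if out ≠ [] ∧ (sep = true ∨ l.head? = some ':') then [':'] else []) ++
                PySem.Chars.join [':'] (seg l)) := by
  induction l with
  | nil => intro out sep; simp [seg_nil]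
  | cons c t ih =>
    intro out sep
    by_cases hc : c = ':'
    · subst hc
      have hseg : seg (':' :: t) = seg t := by
        have h0 : (':' :: t) = [] ++ ':' :: t := by simp
        rw [h0, seg_append_colon, seg_nil, List.nil_append]
      simp only [List.foldl_cons, bStep]
      rw [ih, hseg]
      by_cases hs : seg t = []
      · simp [hs]
      · by_cases ho : out = [] <;> simp [hs, ho]
    · simp only [List.foldl_cons, bStep, if_neg hc]
      rw [ih]
      cases hm : mySplit t with
      | nil => exact absurd hm (mySplit_ne_nil t)
      | cons h tt =>
        have hsegc : seg (c :: t) = (c :: h) :: tt.filter (fun x => !x.isEmpty) := by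
          simp only [seg, mySplit, if_neg hc, hm, List.filter_cons]
          simp
        have hne : seg (c :: t) ≠ [] := by rw [hsegc]; simp
        rw [if_neg hne, hsegc]
        have hcond : (if out ≠ [] ∧ (sep = true ∨ (c :: t).head? = some ':') then ([':'] : List Char) else [])
            = (if sep = true ∧ out ≠ [] then [':'] else []) := by
          simp only [List.head?]
          by_cases hs2 : sep = true ∧ out ≠ []
          · rw [if_pos hs2, if_pos ⟨hs2.2, Or.inl hs2.1⟩]
          · rw [if_neg hs2, if_neg ?_]
            rintro ⟨ho, hso | hhd⟩
            · exact hs2 ⟨hso, ho⟩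
            · simp at hhd; exact hc hhd
        rw [hcond]
        have hone : (out ++ (if sep = true ∧ out ≠ [] then [':'] else []) ++ [c]) ≠ [] := by simp
        -- cancel the common prefix out ++ pre; compare segment joins
        have main : [c] ++ (if seg t = [] then []
              else (if (out ++ (if sep = true ∧ out ≠ [] then [':'] else []) ++ [c]) ≠ [] ∧
                      (false = true ∨ t.head? = some ':') then [':'] else []) ++
                PySem.Chars.join [':'] (seg t))
            = PySem.Chars.join [':'] ((c :: h) :: tt.filter (fun x => !x.isEmpty)) := by
          by_cases he : h = []
          · subst he
            have hsegt : seg t = tt.filter (fun x => !x.isEmpty) := by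
              simp [seg, hm]
            cases hft : tt.filter (fun x => !x.isEmpty) with
            | nil =>
              rw [hsegt, hft]
              simp [PySem.Chars.join_singleton]
            | cons y r =>
              have hth : t.head? = some ':' := by
                rcases (mySplit_head_empty t [] tt hm).mp rfl with h1 | h1
                · exfalso
                  subst h1
                  simp only [mySplit] at hm
                  have : tt = [] := ((List.cons.injEq _ _ _ _ ▸ hm).2).symm
                  rw [this] at hft; simp at hft
                · exact h1
              rw [hsegt, hft]
              simp only [hth, join_cons_cons_char]
              simp [PySem.Chars.join_cons_cons]
          · have hth : ¬ t.head? = some ':' := fun h1 =>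
              he ((mySplit_head_empty t h tt hm).mpr (Or.inr h1))
            have hsegt : seg t = h :: tt.filter (fun x => !x.isEmpty) := by
              simp [seg, hm, he]
            rw [hsegt, join_cons_cons_char]
            simp [hth]
        rw [← main]
        simp only [List.append_assoc]

-- ===== VERDICT (by name: the statement is the Claim_ definition above) =====
theorem compose_prefix_py_spec : Claim_equal_compose_prefix_py := by
  intro base child _
  unfold Spec_compose_prefix_py compose_prefix_py compose_prefix_py_alt
  have hsegL : seg (base.toList ++ [':'] ++ child.toList) = seg base.toList ++ seg child.toList := by
    rw [show base.toList ++ [':'] ++ child.toList = base.toList ++ ':' :: child.toList by simp]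
    exact seg_append_colon _ _
  simp only [List.foldl_cons, List.foldl_nil, stepA_eq, List.nil_append, scan_inv, hsegL]
  set S := seg base.toList ++ seg child.toList with hS
  by_cases hs : S = []
  · simp [hs]
  · have hjoin : PySem.Chars.join [':'] S ≠ [] := by
      cases hSc : S with
      | nil => exact absurd hSc hs
      | cons x r =>
        have hx : x ≠ [] := by
          have hmem : x ∈ S := by rw [hSc]; simp
          have hxe : ¬ x.isEmpty := by
            rw [hS] at hmem
            rcases List.mem_append.mp hmem with h | h <;>
              · have := List.of_mem_filter h; simpa using this
          intro he; subst he; simp at hxe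
        exact join_cons_ne_nil x r hx
    simp [hs, hjoin]
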